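-- pv_equiv track=rewrite | github.com/iofu728/Task | nlpcbb/task1/pretreat.py | wordlist2tuple
-- ===== SOURCE A (Python) =====
-- def wordlist2tuple(wordlist):
--     '''wordlist to index tuple'''
--     word_index = []
--     begin_index, end_index = 0, 0
--     for ii in wordlist.split():
--         begin_index = end_index
--         end_index += len(ii)
--         word_index.append((begin_index, end_index))
--     return word_index
-- ===== SOURCE B (Python) =====
-- def wordlist2tuple(wordlist):
--     '''wordlist to index tuple'''
--     lens = [len(w) for w in wordlist.split()]
--     ends = []
--     total = 0
--     for L in lens:
--         total += L
--         ends.append(total)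
--     begins = [0] + ends[:-1]
--     return list(zip(begins, ends))
-- ===== Notes on version B (the rewrite author's own statement) =====
-- stated objective: alternative
-- what changed: Builds a table of word lengths, prefix-sums it into end offsets, derives begin offsets as [0] plus all-but-last ends, and zips begins with ends, instead of threading a (begin,end) accumulator pair through one loop.
import Mathlib
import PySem

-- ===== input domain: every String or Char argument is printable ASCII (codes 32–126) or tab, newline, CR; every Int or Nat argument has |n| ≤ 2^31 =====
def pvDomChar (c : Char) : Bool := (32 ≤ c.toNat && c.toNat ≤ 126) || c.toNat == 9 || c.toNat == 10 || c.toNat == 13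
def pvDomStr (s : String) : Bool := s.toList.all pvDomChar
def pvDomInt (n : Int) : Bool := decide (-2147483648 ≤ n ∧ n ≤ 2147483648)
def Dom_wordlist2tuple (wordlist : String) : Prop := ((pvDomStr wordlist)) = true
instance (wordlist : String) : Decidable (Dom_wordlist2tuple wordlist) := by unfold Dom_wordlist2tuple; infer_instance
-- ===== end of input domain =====

-- B replaces A's single accumulator loop by a build-table-then-pair decomposition
-- (lengths → prefix-sum end offsets → zip with shifted begin offsets); alternative, same cost.

-- ===== PORT A =====
def wordlist2tuple (wordlist : String) : List (Int × Int) :=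
  -- state: (begin_index, end_index, word_index)
  ((PySem.Str.split₀ wordlist).foldl
    (fun (st : Int × Int × List (Int × Int)) (ii : String) =>
      (st.2.1, st.2.1 + (PySem.Str.len ii : Int),
        st.2.2 ++ [(st.2.1, st.2.1 + (PySem.Str.len ii : Int))]))
    (0, 0, [])).2.2

-- ===== PORT B =====
def wordlist2tuple_alt (wordlist : String) : List (Int × Int) :=
  let lens : List Int := (PySem.Str.split₀ wordlist).map (fun w => (PySem.Str.len w : Int))
  let ends : List Int :=
    (lens.foldl (fun (st : Int × List Int) (L : Int) => (st.1 + L, st.2 ++ [st.1 + L])) (0, [])).2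
  let begins : List Int := 0 :: ends.dropLast
  begins.zip ends

-- ===== PRECONDITION & SPEC =====
def Spec_wordlist2tuple (wordlist : String) (out : List (Int × Int)) : Prop := out = wordlist2tuple_alt wordlist
instance (wordlist : String) (out : List (Int × Int)) : Decidable (Spec_wordlist2tuple wordlist out) := by unfold Spec_wordlist2tuple; infer_instance

-- ===== CLAIM (what is proved, stated in full; the proofs are below) =====
def Claim_equal_wordlist2tuple : Prop := ∀ (wordlist : String), Dom_wordlist2tuple wordlist → Spec_wordlist2tuple wordlist (wordlist2tuple wordlist)

-- ===== LEMMAS AND PROOFS =====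

/-- Reference: the (begin, end) pairs starting at offset `t` for lengths `ls`. -/
def pvPairs (t : Int) : List Int → List (Int × Int)
  | [] => []
  | L :: ls => (t, t + L) :: pvPairs (t + L) ls

/-- Prefix sums of `ls` starting from `t`. -/
def pvEnds (t : Int) : List Int → List Int
  | [] => []
  | L :: ls => (t + L) :: pvEnds (t + L) ls

theorem pvFoldA (ws : List String) (b t : Int) (acc : List (Int × Int)) :
    ((ws.foldl
      (fun (st : Int × Int × List (Int × Int)) (ii : String) =>
        (st.2.1, st.2.1 + (PySem.Str.len ii : Int),
          st.2.2 ++ [(st.2.1, st.2.1 + (PySem.Str.len ii : Int))]))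
      (b, t, acc)).2.2)
      = acc ++ pvPairs t (ws.map (fun w => (PySem.Str.len w : Int))) := by
  induction ws generalizing b t acc with
  | nil => simp [pvPairs]
  | cons w ws ih =>
    simp only [List.foldl_cons]
    rw [ih]
    simp [pvPairs]

theorem pvFoldB (ls : List Int) (t : Int) (es : List Int) :
    ((ls.foldl (fun (st : Int × List Int) (L : Int) => (st.1 + L, st.2 ++ [st.1 + L])) (t, es)).2)
      = es ++ pvEnds t ls := by
  induction ls generalizing t es with
  | nil => simp [pvEnds]
  | cons L ls ih => simp [List.foldl, pvEnds, ih]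

theorem pvZipEnds (ls : List Int) (t : Int) :
    (t :: (pvEnds t ls).dropLast).zip (pvEnds t ls) = pvPairs t ls := by
  induction ls generalizing t with
  | nil => simp [pvEnds, pvPairs]
  | cons L ls ih =>
    cases h : pvEnds (t + L) ls with
    | nil =>
      cases ls with
      | nil => simp [pvEnds, pvPairs]
      | cons a as => simp [pvEnds] at h
    | cons e es =>
      have hih := ih (t + L)
      rw [h] at hih
      simp only [pvEnds, pvPairs, h, List.dropLast_cons₂, List.zip_cons_cons]
      rw [← hih, List.zip_cons_cons]

-- ===== VERDICT (by name: the statement is the Claim_ definition above) =====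
theorem wordlist2tuple_spec : Claim_equal_wordlist2tuple := by
  intro w _
  unfold Spec_wordlist2tuple wordlist2tuple wordlist2tuple_alt
  simp only [pvFoldA, pvFoldB, List.nil_append]
  rw [pvZipEnds]
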